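-- pv_equiv track=rewrite | github.com/mgupta8143/Miscellaneous | tictactoe.py | checkStale
-- ===== SOURCE A (Python) =====
-- def checkStale(arr):
--   numX, numO = 0, 0
--   for i in range(0, len(arr)):
--     if arr[i][0] == 1:
--       numX += 1
--     if arr[i][1] == 1:
--       numO += 1
--     if numX > 0 and numO > 0:
--       return True
--   return False
-- ===== SOURCE B (Python) =====
-- def checkStale(arr):
--   return any(row[0] == 1 for row in arr) and any(row[1] == 1 for row in arr)
-- ===== Notes on version B (the rewrite author's own statement) =====
-- stated objective: simpler
-- what changed: Replaces the interleaved counting loop with early return by two independent short-circuiting existence tests (any over column 0 and any over column 1), with no counters.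
import Mathlib
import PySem

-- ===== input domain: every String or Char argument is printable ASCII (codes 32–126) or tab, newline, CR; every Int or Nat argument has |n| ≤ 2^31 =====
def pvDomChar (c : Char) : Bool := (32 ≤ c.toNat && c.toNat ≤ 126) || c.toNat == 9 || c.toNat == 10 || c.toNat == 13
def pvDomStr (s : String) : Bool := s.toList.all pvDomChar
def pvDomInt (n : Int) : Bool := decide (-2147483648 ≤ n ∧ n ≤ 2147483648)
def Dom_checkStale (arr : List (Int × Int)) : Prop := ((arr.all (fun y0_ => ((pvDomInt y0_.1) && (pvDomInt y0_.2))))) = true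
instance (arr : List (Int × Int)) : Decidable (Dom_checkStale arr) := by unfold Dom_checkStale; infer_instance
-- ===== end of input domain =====

-- B replaces A's interleaved counting loop (with early return) by two independent
-- short-circuiting existence tests joined by `and`; objective: simpler.

-- ===== PORT A =====
-- loop over the rows carrying the counters numX, numO; early `return True`
def checkStaleGo : List (Int × Int) → Int → Int → Bool
  | [], _, _ => false
  | (x, o) :: rest, numX, numO =>
    let numX := if x = 1 then numX + 1 else numX
    let numO := if o = 1 then numO + 1 else numO
    if numX > 0 ∧ numO > 0 then true else checkStaleGo rest numX numO

def checkStale (arr : List (Int × Int)) : Bool := checkStaleGo arr 0 0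

-- ===== PORT B =====
def checkStale_alt (arr : List (Int × Int)) : Bool :=
  (arr.any (fun row => row.1 == 1)) && (arr.any (fun row => row.2 == 1))

-- ===== PRECONDITION & SPEC =====
def Spec_checkStale (arr : List (Int × Int)) (out : Bool) : Prop := out = checkStale_alt arr
instance (arr : List (Int × Int)) (out : Bool) : Decidable (Spec_checkStale arr out) := by unfold Spec_checkStale; infer_instance

-- ===== CLAIM (what is proved, stated in full; the proofs are below) =====
def Claim_equal_checkStale : Prop := ∀ (arr : List (Int × Int)), Dom_checkStale arr → Spec_checkStale arr (checkStale arr)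

-- ===== LEMMAS AND PROOFS =====

/-- Loop invariant: with nonnegative counters, the loop result is
    "counter already positive, or a matching row exists", per column. -/
theorem checkStaleGo_eq (arr : List (Int × Int)) :
    ∀ numX numO : Int, 0 ≤ numX → 0 ≤ numO → ¬(0 < numX ∧ 0 < numO) →
    checkStaleGo arr numX numO =
      ((decide (0 < numX) || arr.any (fun row => row.1 == 1)) &&
       (decide (0 < numO) || arr.any (fun row => row.2 == 1))) := by
  induction arr with
  | nil =>
    intro numX numO hX hO hnb
    simp [checkStaleGo]
    omega
  | cons hd tl ih =>
    intro numX numO hX hO hnb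
    obtain ⟨x, o⟩ := hd
    simp only [checkStaleGo]
    by_cases hx : x = 1 <;> by_cases ho : o = 1 <;>
      simp only [hx, reduceIte] <;>
      split_ifs with hpos
    -- seven goals: (x=1,o=1,ret), (x=1,o=1,rec: impossible), (x=1,o≠1,ret),
    -- (x=1,o≠1,rec), (x≠1,o=1,ret), (x≠1,o=1,rec), (x≠1,o≠1,rec)
    · simp [ho]
    · exfalso; omega
    · simp
      exact Or.inl hpos.2
    · rw [ih _ _ (by omega) hO (by omega)]
      simp only [List.any_cons]
      rw [show (o == 1) = false from beq_eq_false_iff_ne.mpr ho]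
      simp [hX]
    · simp
      exact ⟨Or.inl hpos.1, Or.inr (Or.inl ho)⟩
    · rw [ih _ _ hX (by omega) (by omega)]
      simp only [List.any_cons]
      rw [show (x == 1) = false from beq_eq_false_iff_ne.mpr hx]
      simp [hO, ho]
    · rw [ih _ _ hX hO hnb]
      simp only [List.any_cons]
      rw [show (x == 1) = false from beq_eq_false_iff_ne.mpr hx,
          show (o == 1) = false from beq_eq_false_iff_ne.mpr ho]
      simp

-- ===== VERDICT (by name: the statement is the Claim_ definition above) =====
theorem checkStale_spec : Claim_equal_checkStale := by
  intro arr _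
  unfold Spec_checkStale checkStale checkStale_alt
  rw [checkStaleGo_eq arr 0 0 le_rfl le_rfl (by omega)]
  simp
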